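-- pv_equiv track=rewrite | github.com/oot50674/srt_translate | module/segment_analyzer.py | _has_unmatched_quotes_or_parens
-- ===== SOURCE A (Python) =====
-- def _has_unmatched_quotes_or_parens(text: str) -> bool:
--     """따옴표/괄호가 짝이 안 맞는지 간단히 체크."""
--     # 큰따옴표 짝
--     double_quotes = text.count('"')
--     if double_quotes % 2 == 1:
--         return True
--
--     stack = []
--     pairs = {")": "(", "]": "[", "}": "{"}
--     for ch in text:
--         if ch in "([{":
--             stack.append(ch)
--         elif ch in ")]}":
--             if not stack or stack[-1] != pairs[ch]:
--                 return True
--             stack.pop()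
--
--     return bool(stack)
-- ===== SOURCE B (Python) =====
-- def _drop_adjacent_pairs(s):
--     out = []
--     i = 0
--     while i < len(s):
--         if i + 1 < len(s) and s[i] + s[i + 1] in ('()', '[]', '{}'):
--             i += 2
--         else:
--             out.append(s[i])
--             i += 1
--     return out
--
--
-- def _has_unmatched_quotes_or_parens(text: str) -> bool:
--     if text.count('"') % 2 == 1:
--         return True
--     s = [ch for ch in text if ch in '()[]{}']
--     for _ in range(len(s)):
--         new = _drop_adjacent_pairs(s)
--         if new == s:
--             break
--         s = new
--     return bool(s)
-- ===== Notes on version B (the rewrite author's own statement) =====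
-- stated objective: alternative
-- what changed: Replaces A's one-pass stack matcher (with early return on mismatch) by filtering the text down to its bracket characters and repeatedly deleting adjacent matched opener-closer pairs until a fixpoint, reporting unmatched iff a nonempty residue remains (quote-parity check kept first).
import Mathlib
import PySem

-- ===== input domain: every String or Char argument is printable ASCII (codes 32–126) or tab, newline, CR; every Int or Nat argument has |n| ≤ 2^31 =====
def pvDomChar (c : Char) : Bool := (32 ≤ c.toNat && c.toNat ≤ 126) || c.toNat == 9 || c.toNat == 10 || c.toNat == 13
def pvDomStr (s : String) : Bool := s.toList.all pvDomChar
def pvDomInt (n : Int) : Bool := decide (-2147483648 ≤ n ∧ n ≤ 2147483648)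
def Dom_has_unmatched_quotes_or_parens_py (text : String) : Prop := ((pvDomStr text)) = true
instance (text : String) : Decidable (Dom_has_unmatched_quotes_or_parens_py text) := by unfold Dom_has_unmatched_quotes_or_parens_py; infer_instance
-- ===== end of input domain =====

-- B replaces A's single-pass stack matcher by repeated left-to-right elimination of adjacent
-- matched bracket pairs on the bracket-only filtered characters (alternative algorithm, not faster).


-- ===== PORT A =====
-- pairs = {")": "(", "]": "[", "}": "{"}
def pvPairsA : PySem.Dict Char Char := PySem.Dict.ofList [(')', '('), (']', '['), ('}', '{')]

-- one iteration of A's for-loop body; `none` records that A has already returned True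
-- (membership 'ch in "([{"' is ported as membership in that string's character list)
def pvStepA (st : Option (List Char)) (ch : Char) : Option (List Char) :=
  match st with
  | none => none
  | some stack =>
    if ['(', '[', '{'].contains ch then some (stack ++ [ch])
    else if [')', ']', '}'].contains ch then
      if stack = [] ∨ stack.getLast? ≠ PySem.Dict.get? pvPairsA ch then none
      else some stack.dropLast
    else some stack

def has_unmatched_quotes_or_parens_py (text : String) : Bool :=
  if PySem.Str.count text "\"" % 2 == 1 then true
  else
    match text.toList.foldl pvStepA (some []) with
    | none => true
    | some stack => !stack.isEmpty

-- ===== PORT B =====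
-- the characters of '()[]{}'
def pvBrackets : List Char := ['(', ')', '[', ']', '{', '}']

-- s[i] + s[i+1] in ('()', '[]', '{}')
def pvIsPair (a b : Char) : Bool :=
  (a == '(' && b == ')') || (a == '[' && b == ']') || (a == '{' && b == '}')

-- one left-to-right scan of _drop_adjacent_pairs (skip a matched pair, else keep the char)
def pvDropPairs : List Char → List Char
  | [] => []
  | [a] => [a]
  | a :: b :: t => if pvIsPair a b then pvDropPairs t else a :: pvDropPairs (b :: t)

-- the bounded `for _ in range(len(s))` reduction loop, stopping at a fixpoint
def pvReduce : Nat → List Char → List Char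
  | 0, s => s
  | n + 1, s =>
    let new := pvDropPairs s
    if new = s then s else pvReduce n new

def has_unmatched_quotes_or_parens_py_alt (text : String) : Bool :=
  if PySem.Str.count text "\"" % 2 == 1 then true
  else
    let s := text.toList.filter (fun ch => pvBrackets.contains ch)
    let r := pvReduce s.length s
    !r.isEmpty

-- ===== PRECONDITION & SPEC =====
def Spec_has_unmatched_quotes_or_parens_py (text : String) (out : Bool) : Prop := out = has_unmatched_quotes_or_parens_py_alt text
instance (text : String) (out : Bool) : Decidable (Spec_has_unmatched_quotes_or_parens_py text out) := by unfold Spec_has_unmatched_quotes_or_parens_py; infer_instance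

-- ===== CLAIM (what is proved, stated in full; the proofs are below) =====
def Claim_equal_has_unmatched_quotes_or_parens_py : Prop := ∀ (text : String), Dom_has_unmatched_quotes_or_parens_py text → Spec_has_unmatched_quotes_or_parens_py text (has_unmatched_quotes_or_parens_py text)

-- ===== LEMMAS AND PROOFS =====

-- `none` (A already returned True) is absorbing for the rest of A's loop
theorem pv_foldl_none (l : List Char) : l.foldl pvStepA none = none := by
  induction l with
  | nil => rfl
  | cons c t ih => simpa [pvStepA] using ih

-- characters that are not brackets leave A's loop state unchanged
theorem pv_step_skip (st : Option (List Char)) (ch : Char)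
    (h : pvBrackets.contains ch = false) : pvStepA st ch = st := by
  cases st with
  | none => rfl
  | some stack =>
    have hmem : ¬ (ch = '(' ∨ ch = ')' ∨ ch = '[' ∨ ch = ']' ∨ ch = '{' ∨ ch = '}') := by
      simpa [pvBrackets] using h
    simp only [pvStepA]
    rw [if_neg (by simp only [List.contains_eq_mem, List.mem_cons, List.not_mem_nil, or_false,
          decide_eq_true_eq]; tauto),
        if_neg (by simp only [List.contains_eq_mem, List.mem_cons, List.not_mem_nil, or_false,
          decide_eq_true_eq]; tauto)]

-- A's loop ignores everything B's filter removes
theorem pv_foldl_filter (l : List Char) (st : Option (List Char)) :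
    (l.filter (fun ch => pvBrackets.contains ch)).foldl pvStepA st = l.foldl pvStepA st := by
  induction l generalizing st with
  | nil => rfl
  | cons c t ih =>
    by_cases h : pvBrackets.contains c = true
    · simp only [List.filter_cons, h, if_pos, List.foldl_cons]
      exact ih _
    · rw [Bool.not_eq_true] at h
      simp only [List.filter_cons, h, Bool.false_eq_true, if_false, List.foldl_cons,
        pv_step_skip st c h]
      exact ih _

-- pushing an opener and immediately closing it restores A's state
theorem pv_step_pair (st : Option (List Char)) (a b : Char) (h : pvIsPair a b = true) :
    pvStepA (pvStepA st a) b = st := by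
  cases st with
  | none => rfl
  | some stack =>
    have hg1 : PySem.Dict.get? pvPairsA ')' = some '(' := by decide
    have hg2 : PySem.Dict.get? pvPairsA ']' = some '[' := by decide
    have hg3 : PySem.Dict.get? pvPairsA '}' = some '{' := by decide
    simp only [pvIsPair, Bool.or_eq_true, Bool.and_eq_true, beq_iff_eq] at h
    rcases h with (⟨rfl, rfl⟩ | ⟨rfl, rfl⟩) | ⟨rfl, rfl⟩ <;>
      simp [pvStepA, hg1, hg2, hg3]

-- one scan of B preserves A's loop state
theorem pv_foldl_dropPairs (l : List Char) (st : Option (List Char)) :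
    (pvDropPairs l).foldl pvStepA st = l.foldl pvStepA st := by
  fun_induction pvDropPairs l generalizing st with
  | case1 => rfl
  | case2 a => rfl
  | case3 a b t h ih => simp only [List.foldl_cons, ih, pv_step_pair st a b h]
  | case4 a b t h ih => simp only [List.foldl_cons, ih]

theorem pv_dropPairs_sublist (l : List Char) : (pvDropPairs l).Sublist l := by
  fun_induction pvDropPairs l with
  | case1 => simp
  | case2 a => simp
  | case3 a b t h ih =>
    exact ih.trans ((List.sublist_cons_self b t).trans (List.sublist_cons_self a (b :: t)))
  | case4 a b t h ih => exact ih.cons₂ a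

-- a fixpoint of the scan has no adjacent matched pair
theorem pv_fix_chain (l : List Char) (h : pvDropPairs l = l) :
    List.IsChain (fun a b => pvIsPair a b = false) l := by
  fun_induction pvDropPairs l with
  | case1 => simp
  | case2 a => simp
  | case3 a b t hp ih =>
    exfalso
    have hs := pv_dropPairs_sublist t
    rw [h] at hs
    have := hs.length_le
    simp at this
  | case4 a b t hp ih =>
    simp only [List.cons_inj_right] at h
    exact List.isChain_cons_cons.mpr ⟨by simpa using hp, ih h⟩

-- the whole reduction loop preserves A's loop state
theorem pv_reduce_foldl (n : Nat) (s : List Char) (st : Option (List Char)) :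
    (pvReduce n s).foldl pvStepA st = s.foldl pvStepA st := by
  induction n generalizing s with
  | zero => rfl
  | succ n ih =>
    simp only [pvReduce]
    split
    · rfl
    · rw [ih, pv_foldl_dropPairs]

theorem pv_reduce_sublist (n : Nat) (s : List Char) : (pvReduce n s).Sublist s := by
  induction n generalizing s with
  | zero => simp [pvReduce]
  | succ n ih =>
    simp only [pvReduce]
    split
    · simp
    · exact (ih _).trans (pv_dropPairs_sublist s)

-- len(s) iterations always reach the fixpoint
theorem pv_reduce_fix (n : Nat) (s : List Char) (hn : s.length ≤ n) :
    pvDropPairs (pvReduce n s) = pvReduce n s := by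
  induction n generalizing s with
  | zero =>
    have : s = [] := List.eq_nil_of_length_eq_zero (Nat.le_zero.mp hn)
    subst this; rfl
  | succ n ih =>
    simp only [pvReduce]
    split
    · assumption
    · rename_i hne
      apply ih
      have hsub := pv_dropPairs_sublist s
      have hlt : (pvDropPairs s).length < s.length := by
        rcases Nat.lt_or_ge (pvDropPairs s).length s.length with h | h
        · exact h
        · exact absurd (hsub.eq_of_length (Nat.le_antisymm hsub.length_le h)) hne
      omega

-- core impossibility: after pushing an opener, a pair-free bracket string never empties the stack
theorem pv_no_empty_aux (s : List Char) :
    ∀ (o : Char) (stack : List Char),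
      List.IsChain (fun a b => pvIsPair a b = false) (o :: s) →
      (∀ c ∈ s, pvBrackets.contains c = true) →
      s.foldl pvStepA (some (stack ++ [o])) ≠ some [] := by
  induction s with
  | nil =>
    intro o stack _ _ h
    simp [List.foldl] at h
  | cons c t ih =>
    intro o stack hch hbr
    have hc : c = '(' ∨ c = '[' ∨ c = '{' ∨ c = ')' ∨ c = ']' ∨ c = '}' := by
      have := hbr c (by simp)
      simp [pvBrackets] at this
      tauto
    have hrel : pvIsPair o c = false := ((List.isChain_cons_cons.mp hch)).1
    have hcht : List.IsChain (fun a b => pvIsPair a b = false) (c :: t) :=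
      ((List.isChain_cons_cons.mp hch)).2
    have hbrt : ∀ x ∈ t, pvBrackets.contains x = true := fun x hx => hbr x (by simp [hx])
    rcases hc with h1 | h1 | h1 | h1 | h1 | h1 <;> subst h1
    -- openers: push and recurse
    · rw [List.foldl_cons, show pvStepA (some (stack ++ [o])) '(' =
        some ((stack ++ [o]) ++ ['(']) from by simp [pvStepA]]
      exact ih '(' (stack ++ [o]) hcht hbrt
    · rw [List.foldl_cons, show pvStepA (some (stack ++ [o])) '[' =
        some ((stack ++ [o]) ++ ['[']) from by simp [pvStepA]]
      exact ih '[' (stack ++ [o]) hcht hbrt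
    · rw [List.foldl_cons, show pvStepA (some (stack ++ [o])) '{' =
        some ((stack ++ [o]) ++ ['{']) from by simp [pvStepA]]
      exact ih '{' (stack ++ [o]) hcht hbrt
    -- closers: the top of the stack is o, which cannot match (no adjacent pair), so A fails
    · have ho : o ≠ '(' := by rintro rfl; simp [pvIsPair] at hrel
      have hg1 : PySem.Dict.get? pvPairsA ')' = some '(' := by decide
      rw [List.foldl_cons, show pvStepA (some (stack ++ [o])) ')' = none from by
        simp [pvStepA, hg1, ho], pv_foldl_none]
      simp
    · have ho : o ≠ '[' := by rintro rfl; simp [pvIsPair] at hrel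
      have hg2 : PySem.Dict.get? pvPairsA ']' = some '[' := by decide
      rw [List.foldl_cons, show pvStepA (some (stack ++ [o])) ']' = none from by
        simp [pvStepA, hg2, ho], pv_foldl_none]
      simp
    · have ho : o ≠ '{' := by rintro rfl; simp [pvIsPair] at hrel
      have hg3 : PySem.Dict.get? pvPairsA '}' = some '{' := by decide
      rw [List.foldl_cons, show pvStepA (some (stack ++ [o])) '}' = none from by
        simp [pvStepA, hg3, ho], pv_foldl_none]
      simp

-- an irreducible nonempty bracket string never leaves A's loop with an empty stack
theorem pv_no_empty (c : Char) (t : List Char)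
    (hch : List.IsChain (fun a b => pvIsPair a b = false) (c :: t))
    (hbr : ∀ x ∈ c :: t, pvBrackets.contains x = true) :
    (c :: t).foldl pvStepA (some []) ≠ some [] := by
  have hc : c = '(' ∨ c = '[' ∨ c = '{' ∨ c = ')' ∨ c = ']' ∨ c = '}' := by
    have := hbr c (by simp)
    simp [pvBrackets] at this
    tauto
  have hbrt : ∀ x ∈ t, pvBrackets.contains x = true := fun x hx => hbr x (by simp [hx])
  rcases hc with h1 | h1 | h1 | h1 | h1 | h1 <;> subst h1
  · rw [List.foldl_cons, show pvStepA (some []) '(' = some (([] : List Char) ++ ['(']) from by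
      simp [pvStepA]]
    exact pv_no_empty_aux t '(' [] hch hbrt
  · rw [List.foldl_cons, show pvStepA (some []) '[' = some (([] : List Char) ++ ['[']) from by
      simp [pvStepA]]
    exact pv_no_empty_aux t '[' [] hch hbrt
  · rw [List.foldl_cons, show pvStepA (some []) '{' = some (([] : List Char) ++ ['{']) from by
      simp [pvStepA]]
    exact pv_no_empty_aux t '{' [] hch hbrt
  · rw [List.foldl_cons, show pvStepA (some []) ')' = none from by simp [pvStepA], pv_foldl_none]
    simp
  · rw [List.foldl_cons, show pvStepA (some []) ']' = none from by simp [pvStepA], pv_foldl_none]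
    simp
  · rw [List.foldl_cons, show pvStepA (some []) '}' = none from by simp [pvStepA], pv_foldl_none]
    simp

-- ===== VERDICT (by name: the statement is the Claim_ definition above) =====
theorem has_unmatched_quotes_or_parens_py_spec : Claim_equal_has_unmatched_quotes_or_parens_py := by
  unfold Claim_equal_has_unmatched_quotes_or_parens_py
  intro text _
  unfold Spec_has_unmatched_quotes_or_parens_py
  unfold has_unmatched_quotes_or_parens_py has_unmatched_quotes_or_parens_py_alt
  split
  · rfl
  · simp only []
    have hfold : text.toList.foldl pvStepA (some []) =
        (pvReduce (text.toList.filter (fun ch => pvBrackets.contains ch)).length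
          (text.toList.filter (fun ch => pvBrackets.contains ch))).foldl pvStepA (some []) := by
      rw [pv_reduce_foldl, pv_foldl_filter]
    cases hre : pvReduce (text.toList.filter (fun ch => pvBrackets.contains ch)).length
        (text.toList.filter (fun ch => pvBrackets.contains ch)) with
    | nil =>
      rw [hre] at hfold
      simp only [List.foldl_nil] at hfold
      rw [hfold]
    | cons c t =>
      have hsub := pv_reduce_sublist
        (text.toList.filter (fun ch => pvBrackets.contains ch)).length
        (text.toList.filter (fun ch => pvBrackets.contains ch))
      rw [hre] at hsub
      have hbr : ∀ x ∈ c :: t, pvBrackets.contains x = true := by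
        intro x hx
        exact (List.mem_filter.mp (hsub.subset hx)).2
      have hchain : List.IsChain (fun a b => pvIsPair a b = false) (c :: t) := by
        have := pv_fix_chain _ (pv_reduce_fix
          (text.toList.filter (fun ch => pvBrackets.contains ch)).length
          (text.toList.filter (fun ch => pvBrackets.contains ch)) le_rfl)
        rwa [hre] at this
      have hne : text.toList.foldl pvStepA (some []) ≠ some [] := by
        rw [hfold, hre]
        exact pv_no_empty c t hchain hbr
      cases hA : text.toList.foldl pvStepA (some []) with
      | none => simp
      | some stack =>
        cases stack with
        | nil => exact absurd hA hne
        | cons a s => simp
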